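-- pv_equiv track=rewrite | github.com/r0drig0-batista/paper-submission | ner_task/process_to_bio.py | split_documents_by_filelist
-- ===== SOURCE A (Python) =====
-- def split_documents_by_filelist(documents, train_files, val_files, test_files):
--     """
--     Split all processed documents into train/validation/test sets
--     based on file lists loaded from the split configuration.
--     """
--     train_docs, val_docs, test_docs = [], [], []
--
--     for doc in documents:
--         ata_id = doc.get("ata_id")
--         if f"{ata_id}.json" in train_files:
--             train_docs.append(doc)
--         elif f"{ata_id}.json" in val_files:
--             val_docs.append(doc)
--         elif f"{ata_id}.json" in test_files:
--             test_docs.append(doc)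
--
--     return train_docs, val_docs, test_docs
-- ===== SOURCE B (Python) =====
-- def split_documents_by_filelist(documents, train_files, val_files, test_files):
--     # Staged decomposition: first name every document once, then build each
--     # bucket with its own independent filter pass; the train > val > test
--     # precedence of the original elif chain is expressed declaratively by
--     # excluding the earlier buckets' filelists in each predicate.
--     named = [(f'{doc.get("ata_id")}.json', doc) for doc in documents]
--     train = [d for n, d in named if n in train_files]
--     val = [d for n, d in named if n in val_files and n not in train_files]
--     test = [d for n, d in named
--             if n in test_files and n not in train_files and n not in val_files]
--     return train, val, test
-- ===== Notes on version B (the rewrite author's own statement) =====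
-- stated objective: alternative
-- what changed: Replaces A's single accumulator loop with an elif chain by a staged decomposition: one naming pass, then three independent filter comprehensions, each bucket's predicate stating membership in its filelist and non-membership in the higher-priority ones.
import Mathlib
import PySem

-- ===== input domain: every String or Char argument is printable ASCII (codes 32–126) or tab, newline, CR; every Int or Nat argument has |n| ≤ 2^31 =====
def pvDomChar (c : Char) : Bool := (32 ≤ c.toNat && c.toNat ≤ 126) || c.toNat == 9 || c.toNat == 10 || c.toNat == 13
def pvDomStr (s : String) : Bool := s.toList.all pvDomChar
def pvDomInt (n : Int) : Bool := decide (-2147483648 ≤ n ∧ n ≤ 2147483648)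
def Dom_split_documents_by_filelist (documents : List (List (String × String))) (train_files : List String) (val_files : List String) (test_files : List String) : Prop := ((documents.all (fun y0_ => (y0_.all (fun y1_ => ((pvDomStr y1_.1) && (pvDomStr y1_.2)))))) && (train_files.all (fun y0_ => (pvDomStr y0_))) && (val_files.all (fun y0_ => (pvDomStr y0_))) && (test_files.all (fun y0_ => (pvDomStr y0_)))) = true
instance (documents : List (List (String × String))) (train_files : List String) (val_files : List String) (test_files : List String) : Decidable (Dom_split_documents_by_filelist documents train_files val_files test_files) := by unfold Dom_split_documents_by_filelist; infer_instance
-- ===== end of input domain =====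

-- B restructures A's single elif-accumulator loop into a staged decomposition:
-- one naming pass, then three independent filter passes whose predicates encode
-- the train > val > test precedence (objective: alternative, same cost).


-- f"{doc.get('ata_id')}.json" (doc.get on a missing key gives None, printed "None")
def pvFname (doc : List (String × String)) : String :=
  (((PySem.Dict.mk doc).get? "ata_id").getD "None") ++ ".json"

-- ===== PORT A =====
def split_documents_by_filelist (documents : List (List (String × String))) (train_files : List String) (val_files : List String) (test_files : List String) : (List (List (String × String))) × (List (List (String × String))) × (List (List (String × String))) :=
  documents.foldl
    (fun s doc =>
      let name := pvFname doc
      if name ∈ train_files then (s.1 ++ [doc], s.2.1, s.2.2)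
      else if name ∈ val_files then (s.1, s.2.1 ++ [doc], s.2.2)
      else if name ∈ test_files then (s.1, s.2.1, s.2.2 ++ [doc])
      else s)
    ([], [], [])

-- ===== PORT B =====
def split_documents_by_filelist_alt (documents : List (List (String × String))) (train_files : List String) (val_files : List String) (test_files : List String) : (List (List (String × String))) × (List (List (String × String))) × (List (List (String × String))) :=
  let named := documents.map (fun doc => (pvFname doc, doc))
  let train := (named.filter (fun p => p.1 ∈ train_files)).map Prod.snd
  let val := (named.filter (fun p => p.1 ∈ val_files ∧ p.1 ∉ train_files)).map Prod.snd
  let test := (named.filter (fun p => p.1 ∈ test_files ∧ p.1 ∉ train_files ∧ p.1 ∉ val_files)).map Prod.snd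
  (train, val, test)

-- ===== PRECONDITION & SPEC =====
def Spec_split_documents_by_filelist (documents : List (List (String × String))) (train_files : List String) (val_files : List String) (test_files : List String) (out : (List (List (String × String))) × (List (List (String × String))) × (List (List (String × String)))) : Prop := out = split_documents_by_filelist_alt documents train_files val_files test_files
instance (documents : List (List (String × String))) (train_files : List String) (val_files : List String) (test_files : List String) (out : (List (List (String × String))) × (List (List (String × String))) × (List (List (String × String)))) : Decidable (Spec_split_documents_by_filelist documents train_files val_files test_files out) := by unfold Spec_split_documents_by_filelist; infer_instance

-- ===== CLAIM (what is proved, stated in full; the proofs are below) =====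
def Claim_equal_split_documents_by_filelist : Prop := ∀ (documents : List (List (String × String))) (train_files : List String) (val_files : List String) (test_files : List String), Dom_split_documents_by_filelist documents train_files val_files test_files → Spec_split_documents_by_filelist documents train_files val_files test_files (split_documents_by_filelist documents train_files val_files test_files)

-- ===== LEMMAS AND PROOFS =====

theorem split_foldl_eq_filters (train_files val_files test_files : List String)
    (docs : List (List (String × String)))
    (s : (List (List (String × String))) × (List (List (String × String))) × (List (List (String × String)))) :
    docs.foldl
      (fun s doc =>
        let name := pvFname doc
        if name ∈ train_files then (s.1 ++ [doc], s.2.1, s.2.2)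
        else if name ∈ val_files then (s.1, s.2.1 ++ [doc], s.2.2)
        else if name ∈ test_files then (s.1, s.2.1, s.2.2 ++ [doc])
        else s)
      s =
    (s.1 ++ ((docs.map (fun doc => (pvFname doc, doc))).filter
        (fun p => p.1 ∈ train_files)).map Prod.snd,
     s.2.1 ++ ((docs.map (fun doc => (pvFname doc, doc))).filter
        (fun p => p.1 ∈ val_files ∧ p.1 ∉ train_files)).map Prod.snd,
     s.2.2 ++ ((docs.map (fun doc => (pvFname doc, doc))).filter
        (fun p => p.1 ∈ test_files ∧ p.1 ∉ train_files ∧ p.1 ∉ val_files)).map Prod.snd) := by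
  induction docs generalizing s with
  | nil => simp
  | cons doc docs ih =>
    simp only [List.foldl_cons, List.map_cons, List.filter_cons]
    by_cases h1 : pvFname doc ∈ train_files <;>
      by_cases h2 : pvFname doc ∈ val_files <;>
        by_cases h3 : pvFname doc ∈ test_files <;>
          simp [h1, h2, h3, ih]

-- ===== VERDICT (by name: the statement is the Claim_ definition above) =====
theorem split_documents_by_filelist_spec : Claim_equal_split_documents_by_filelist := by
  intro documents train_files val_files test_files _
  unfold Spec_split_documents_by_filelist split_documents_by_filelist split_documents_by_filelist_alt
  rw [split_foldl_eq_filters]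
  simp
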